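-- pv_equiv track=rewrite | github.com/joestalker1/leetcode | src/main/scala/contest/234/MaximizeNumberOfNiceDivisors.py | maxNiceDivisors
-- ===== SOURCE A (Python) =====
-- def maxNiceDivisors(primeFactors: int):
--
--     def power(x,p, mod):
--         res = 1
--         while p:
--             if p & 1 == 1:
--                 res = (res * x) % mod
--             p >>= 1
--             x = (x * x) % mod
--         return res
--
--     if primeFactors <= 3:
--         return primeFactors
--     mod = 10 ** 9 + 7
--     div3 = primeFactors // 3
--     rem = primeFactors % 3
--     if rem == 0:
--         return power(3, div3, mod)
--     if rem == 1:
--         div3 -= 1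
--         rem = 4
--         return (rem * power(3, div3, mod)) % mod
--     return (rem * power(3,div3, mod)) % mod
-- ===== SOURCE B (Python) =====
-- def maxNiceDivisors(primeFactors: int):
--     if primeFactors <= 3:
--         return primeFactors
--     MOD = 10 ** 9 + 7
--     q = primeFactors // 3
--     r = primeFactors % 3
--     if r == 1:
--         q -= 1
--     coef = 4 if r == 1 else (1 if r == 0 else r)
--     # sqrt decomposition of the exponent: 3^q = (3^b)^(q//b) * 3^(q%b)
--     b = 1
--     while b * b <= q:
--         b += 1
--     step = 1
--     for _ in range(b):
--         step = step * 3 % MOD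
--     hi = 1
--     for _ in range(q // b):
--         hi = hi * step % MOD
--     lo = 1
--     for _ in range(q % b):
--         lo = lo * 3 % MOD
--     return coef * hi % MOD * lo % MOD
-- ===== Notes on version B (the rewrite author's own statement) =====
-- stated objective: alternative
-- what changed: B replaces A's square-and-halve binary exponentiation with a sqrt decomposition of the exponent: it finds b with b*b > q by a counting loop and computes 3^q as (3^b)^(q//b) * 3^(q%b) via three plain repeated-multiplication loops of O(sqrt q) steps each, with a single unified coefficient at the end.
import Mathlib
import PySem

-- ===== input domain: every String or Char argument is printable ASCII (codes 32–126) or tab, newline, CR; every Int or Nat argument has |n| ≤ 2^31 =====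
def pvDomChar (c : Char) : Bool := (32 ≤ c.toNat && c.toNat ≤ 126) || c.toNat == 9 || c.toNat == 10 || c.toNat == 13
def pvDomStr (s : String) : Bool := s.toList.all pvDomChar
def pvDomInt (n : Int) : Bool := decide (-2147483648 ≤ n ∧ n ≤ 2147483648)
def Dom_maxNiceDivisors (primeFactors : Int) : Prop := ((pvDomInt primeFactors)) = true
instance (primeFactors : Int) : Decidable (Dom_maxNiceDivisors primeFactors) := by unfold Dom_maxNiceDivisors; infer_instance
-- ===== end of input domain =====

-- B replaces A's square-and-halve binary exponentiation by a sqrt decomposition of the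
-- exponent computed with three plain repeated-multiplication loops (alternative algorithm,
-- same value everywhere).


-- ===== PORT A =====
-- A's `power(x, p, mod)` while-loop; p is always the nonnegative `div3`, so the Nat
-- exponent with p &&& 1 / p >>> 1 is exact for every call this program makes.
def powA (x : Int) (p : Nat) (m : Int) (res : Int) : Int :=
  if p = 0 then res
  else powA (PySem.Int.mod (x * x) m) (p >>> 1) m
            (if p &&& 1 = 1 then PySem.Int.mod (res * x) m else res)
decreasing_by simpa [Nat.shiftRight_succ] using Nat.div_lt_self (Nat.pos_of_ne_zero (by assumption)) one_lt_two

def maxNiceDivisors (primeFactors : Int) : Int :=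
  if primeFactors ≤ 3 then primeFactors
  else
    let mod : Int := 10 ^ 9 + 7
    let div3 := PySem.Int.floordiv primeFactors 3
    let rem := PySem.Int.mod primeFactors 3
    if rem = 0 then powA 3 div3.toNat mod 1
    else if rem = 1 then
      PySem.Int.mod (4 * powA 3 (div3 - 1).toNat mod 1) mod
    else PySem.Int.mod (rem * powA 3 div3.toNat mod 1) mod

-- ===== PORT B =====
-- Source B's `while b * b <= q: b += 1`; b starts at 1 and only increments, so a Nat counter
-- is exact.
def sqrtLoopB (q : Int) (b : Nat) : Nat :=
  if (b : Int) * (b : Int) ≤ q then sqrtLoopB q (b + 1) else b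
termination_by (q + 1).toNat - b * b
decreasing_by
  rename_i h
  have h1 : ((b : Int) * (b : Int)).toNat = b * b := by omega
  have h2 : b * b < (b + 1) * (b + 1) := by nlinarith
  omega

-- Source B's `for _ in range(n): acc = acc * c % MOD` loops.
def mulLoopB (m c : Int) : Nat → Int → Int
  | 0, acc => acc
  | n + 1, acc => mulLoopB m c n (PySem.Int.mod (acc * c) m)

def maxNiceDivisors_alt (primeFactors : Int) : Int :=
  if primeFactors ≤ 3 then primeFactors
  else
    let MOD : Int := 10 ^ 9 + 7
    let q0 := PySem.Int.floordiv primeFactors 3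
    let r := PySem.Int.mod primeFactors 3
    let q := if r = 1 then q0 - 1 else q0
    let coef : Int := if r = 1 then 4 else if r = 0 then 1 else r
    let b := sqrtLoopB q 1
    let step := mulLoopB MOD 3 b 1
    let hi := mulLoopB MOD step (PySem.Int.floordiv q (b : Int)).toNat 1
    let lo := mulLoopB MOD 3 (PySem.Int.mod q (b : Int)).toNat 1
    PySem.Int.mod (PySem.Int.mod (coef * hi) MOD * lo) MOD

-- ===== PRECONDITION & SPEC =====
def Spec_maxNiceDivisors (primeFactors : Int) (out : Int) : Prop := out = maxNiceDivisors_alt primeFactors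
instance (primeFactors : Int) (out : Int) : Decidable (Spec_maxNiceDivisors primeFactors out) := by unfold Spec_maxNiceDivisors; infer_instance

-- ===== CLAIM (what is proved, stated in full; the proofs are below) =====
def Claim_equal_maxNiceDivisors : Prop := ∀ (primeFactors : Int), Dom_maxNiceDivisors primeFactors → Spec_maxNiceDivisors primeFactors (maxNiceDivisors primeFactors)

-- ===== LEMMAS AND PROOFS =====

-- A's square-and-multiply loop computes res * x^p mod m (for reduced res).
theorem powA_eq (m : Int) (hm : 1 < m) :
    ∀ p x res, 0 ≤ res → res < m → powA x p m res = (res * x ^ p) % m := by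
  intro p
  induction p using Nat.strong_induction_on with
  | _ p ih =>
    intro x res h0 h1
    rw [powA]
    by_cases hp : p = 0
    · simp [hp, Int.emod_eq_of_lt h0 h1]
    · simp only [hp, ite_false]
      have hm0 : (0:Int) < m := by omega
      have hlt : p >>> 1 < p := by
        simpa [Nat.shiftRight_succ] using Nat.div_lt_self (Nat.pos_of_ne_zero hp) one_lt_two
      have hhalf : p >>> 1 = p / 2 := by simp [Nat.shiftRight_succ]
      have hbit : p &&& 1 = p % 2 := Nat.and_one_is_mod p
      simp only [PySem.Int.mod_eq_emod_of_pos hm0]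
      by_cases hb : p &&& 1 = 1
      · rw [if_pos hb,
          ih _ hlt _ _ (Int.emod_nonneg _ (by omega)) (Int.emod_lt_of_pos _ hm0), hhalf]
        have hme : (res * x % m * (x * x % m) ^ (p / 2)) % m
            = (res * x * (x * x) ^ (p / 2)) % m :=
          Int.ModEq.mul (Int.emod_emod_of_dvd (res * x) dvd_rfl)
            (Int.ModEq.pow (p / 2) (Int.emod_emod_of_dvd (x * x) dvd_rfl))
        have hpe : p = 2 * (p / 2) + 1 := by omega
        rw [hme]
        conv_rhs => rw [hpe]
        rw [pow_add, pow_mul, pow_one]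
        ring_nf
      · rw [if_neg hb, ih _ hlt _ _ h0 h1, hhalf]
        have hme : (res * (x * x % m) ^ (p / 2)) % m
            = (res * (x * x) ^ (p / 2)) % m :=
          ((Int.ModEq.pow (p / 2) (Int.emod_emod_of_dvd (x * x) dvd_rfl))).mul_left res
        have hpe : p = 2 * (p / 2) := by omega
        rw [hme]
        conv_rhs => rw [hpe]
        rw [pow_mul, sq]

-- B's repeated-multiplication loop computes acc * c^n mod m (for reduced acc).
theorem mulLoopB_eq (m : Int) (hm : 1 < m) :
    ∀ n c acc, 0 ≤ acc → acc < m → mulLoopB m c n acc = (acc * c ^ n) % m := by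
  intro n
  induction n with
  | zero => intro c acc h0 h1; simp [mulLoopB, Int.emod_eq_of_lt h0 h1]
  | succ n ih =>
    intro c acc h0 h1
    have hm0 : (0:Int) < m := by omega
    rw [mulLoopB, PySem.Int.mod_eq_emod_of_pos hm0,
      ih c _ (Int.emod_nonneg _ (by omega)) (Int.emod_lt_of_pos _ hm0)]
    have h : (acc * c % m * c ^ n) % m = (acc * c * c ^ n) % m :=
      Int.ModEq.mul_right _ (Int.emod_emod_of_dvd (acc * c) dvd_rfl)
    rw [h, pow_succ]
    ring_nf

-- the sqrt-loop counter never decreases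
theorem sqrtLoopB_le (q : Int) (b : Nat) : b ≤ sqrtLoopB q b := by
  rw [sqrtLoopB]
  split
  · exact le_trans (Nat.le_succ b) (sqrtLoopB_le q (b + 1))
  · exact Nat.le_refl b
termination_by (q + 1).toNat - b * b
decreasing_by
  rename_i h
  have h1 : ((b : Int) * (b : Int)).toNat = b * b := by omega
  have h2 : b * b < (b + 1) * (b + 1) := by nlinarith
  omega

-- multiplying a reduced power by a coefficient mod m
theorem coef_pow (m coef x : Int) (n : Nat) :
    (coef * (x ^ n % m)) % m = (coef * x ^ n) % m :=
  Int.ModEq.mul_left coef (Int.emod_emod_of_dvd (x ^ n) dvd_rfl)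

-- B's sqrt-decomposition block computes (coef * 3^q) % m for nonnegative q.
theorem altCore_eq (m : Int) (hm : 1 < m) (coef q : Int) (hq : 0 ≤ q) (b : Nat) (hb : 0 < b) :
    PySem.Int.mod (PySem.Int.mod (coef * mulLoopB m (mulLoopB m 3 b 1) (PySem.Int.floordiv q (b : Int)).toNat 1) m * mulLoopB m 3 (PySem.Int.mod q (b : Int)).toNat 1) m
      = (coef * 3 ^ q.toNat) % m := by
  have hm0 : (0:Int) < m := by omega
  have hbI : (0:Int) < (b : Int) := by exact_mod_cast hb
  set h := (PySem.Int.floordiv q (b : Int)).toNat with hh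
  set l := (PySem.Int.mod q (b : Int)).toNat with hl
  have hdiv : PySem.Int.floordiv q (b : Int) * (b : Int) + PySem.Int.mod q (b : Int) = q :=
    PySem.Int.floordiv_mul_add_mod q (b : Int)
  have hd0 : 0 ≤ PySem.Int.floordiv q (b : Int) := by
    rw [PySem.Int.floordiv_eq_ediv_of_pos hbI]
    exact Int.ediv_nonneg hq (le_of_lt hbI)
  have hr0 : 0 ≤ PySem.Int.mod q (b : Int) := PySem.Int.mod_nonneg q hbI
  have h1 : ((h : Int)) = PySem.Int.floordiv q (b : Int) := by simp [hh, Int.toNat_of_nonneg hd0]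
  have h2 : ((l : Int)) = PySem.Int.mod q (b : Int) := by simp [hl, Int.toNat_of_nonneg hr0]
  have hcast : ((h * b + l : Nat) : Int) = q := by push_cast; rw [h1, h2]; exact hdiv
  have hN : h * b + l = q.toNat := by omega
  have hstep : mulLoopB m 3 b 1 = 3 ^ b % m := by
    rw [mulLoopB_eq m hm b 3 1 (by norm_num) hm, one_mul]
  have hhi : mulLoopB m (mulLoopB m 3 b 1) h 1 = (3 ^ b % m) ^ h % m := by
    rw [hstep, mulLoopB_eq m hm h _ 1 (by norm_num) hm, one_mul]
  have hlo : mulLoopB m 3 l 1 = 3 ^ l % m := by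
    rw [mulLoopB_eq m hm l 3 1 (by norm_num) hm, one_mul]
  rw [hhi, hlo, PySem.Int.mod_eq_emod_of_pos hm0, PySem.Int.mod_eq_emod_of_pos hm0]
  have c1 : ((3:Int) ^ b % m) ^ h ≡ (3 ^ b) ^ h [ZMOD m] := by
    exact_mod_cast Int.ModEq.pow h (Int.emod_emod_of_dvd (3 ^ b) dvd_rfl)
  have c2 : (coef * (((3:Int) ^ b % m) ^ h % m)) % m * (3 ^ l % m) ≡ coef * (3 ^ b) ^ h * 3 ^ l [ZMOD m] := by
    refine Int.ModEq.mul ?_ (Int.emod_emod_of_dvd _ dvd_rfl)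
    calc (coef * (((3:Int) ^ b % m) ^ h % m)) % m
        ≡ coef * (((3:Int) ^ b % m) ^ h % m) [ZMOD m] := Int.emod_emod_of_dvd _ dvd_rfl
      _ ≡ coef * (((3:Int) ^ b % m) ^ h) [ZMOD m] := Int.ModEq.mul_left coef (Int.emod_emod_of_dvd _ dvd_rfl)
      _ ≡ coef * ((3:Int) ^ b) ^ h [ZMOD m] := Int.ModEq.mul_left coef c1
  have : (coef * (((3:Int) ^ b % m) ^ h % m)) % m * (3 ^ l % m) % m = (coef * (3 ^ b) ^ h * 3 ^ l) % m := c2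
  rw [this, mul_assoc, ← pow_mul, ← pow_add]
  have hbh : b * h + l = q.toNat := by rw [Nat.mul_comm]; exact hN
  rw [hbh]

-- ===== VERDICT (by name: the statement is the Claim_ definition above) =====
theorem maxNiceDivisors_spec : Claim_equal_maxNiceDivisors := by
  intro p _
  unfold Spec_maxNiceDivisors maxNiceDivisors maxNiceDivisors_alt
  by_cases hle : p ≤ 3
  · simp [hle]
  · simp only [hle, ite_false]
    set m : Int := 10 ^ 9 + 7 with hm
    have hm1 : (1:Int) < m := by norm_num [hm]
    have hr0 := PySem.Int.mod_nonneg p (b := 3) (by omega)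
    have hr3 := PySem.Int.mod_lt p (b := 3) (by omega)
    have hqr := PySem.Int.floordiv_mul_add_mod p 3
    set r := PySem.Int.mod p 3 with hrdef
    set q0 := PySem.Int.floordiv p 3 with hqdef
    have hq0 : 1 ≤ q0 := by omega
    have hb0 : ∀ q : Int, 0 < sqrtLoopB q 1 := fun q => sqrtLoopB_le q 1
    have hcase : r = 0 ∨ r = 1 ∨ r = 2 := by omega
    rcases hcase with h | h | h
    · simp only [h, ite_true, if_neg (by norm_num : (0 : Int) ≠ 1)]
      rw [altCore_eq m hm1 1 q0 (by omega) _ (hb0 q0),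
        powA_eq m hm1 q0.toNat 3 1 (by norm_num) hm1]
    · simp only [h, ite_true]
      rw [if_neg (by norm_num : ¬(1:Int) = 0),
        altCore_eq m hm1 4 (q0 - 1) (by omega) _ (hb0 (q0 - 1)),
        powA_eq m hm1 (q0 - 1).toNat 3 1 (by norm_num) hm1,
        PySem.Int.mod_eq_emod_of_pos (by omega), one_mul, coef_pow]
    · simp only [h, if_neg (by norm_num : (2:Int) ≠ 1), if_neg (by norm_num : (2:Int) ≠ 0)]
      rw [altCore_eq m hm1 2 q0 (by omega) _ (hb0 q0),
        powA_eq m hm1 q0.toNat 3 1 (by norm_num) hm1,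
        PySem.Int.mod_eq_emod_of_pos (by omega), one_mul, coef_pow]
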